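-- pv_equiv track=rewrite | github.com/jnb666/pytorch | ml/gui.py | calc_grid
-- ===== SOURCE A (Python) =====
-- import math
--
-- def calc_grid(items: int, rows=0, square=False) -> tuple[int, int]:
--     if items <= 1:
--         return 1, 1
--     if rows < 1:
--         rows = round(math.sqrt(items))
--     while rows >= 1:
--         cols = 1 + (items-1) // rows
--         if not square or rows*cols == items:
--             return rows, cols
--         rows -= 1
--     return rows, cols
-- ===== SOURCE B (Python) =====
-- import math
--
-- def calc_grid(items: int, rows=0, square=False) -> tuple[int, int]:
--     if items <= 1:
--         return 1, 1
--     if rows < 1: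
--         rows = round(math.sqrt(items))
--     if not square:
--         return rows, 1 + (items - 1) // rows
--     # square: largest divisor of items that is <= rows (ascending scan, running best)
--     best = 1
--     for d in range(1, rows + 1):
--         if items % d == 0:
--             best = d
--     return best, items // best
-- ===== Notes on version B (the rewrite author's own statement) =====
-- stated objective: alternative
-- what changed: Replaces A's descending while-loop with early return (which recomputes ceil-div each step and tests rows*cols==items) by a direct formula for the non-square case and, for square, an ascending running-best scan over range(1, rows+1) keeping the largest divisor, then a single division.
import Mathlib
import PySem

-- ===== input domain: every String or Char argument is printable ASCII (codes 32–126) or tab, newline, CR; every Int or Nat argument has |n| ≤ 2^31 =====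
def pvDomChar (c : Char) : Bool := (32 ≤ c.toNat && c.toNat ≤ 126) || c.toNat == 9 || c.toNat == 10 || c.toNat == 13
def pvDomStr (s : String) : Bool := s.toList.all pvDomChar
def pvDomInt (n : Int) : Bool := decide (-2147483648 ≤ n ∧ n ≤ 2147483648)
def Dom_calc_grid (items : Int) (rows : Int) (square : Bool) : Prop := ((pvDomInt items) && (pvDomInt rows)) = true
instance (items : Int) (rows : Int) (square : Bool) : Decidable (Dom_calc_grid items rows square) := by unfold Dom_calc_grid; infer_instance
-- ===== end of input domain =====

-- B replaces A's descending early-return while-loop by a direct formula (non-square) and an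
-- ascending running-best divisor scan (square); objective: alternative decomposition, same cost.

-- ===== PORT A =====
-- round(math.sqrt(items)): for 2 ≤ items ≤ 2^31 the double sqrt is exact enough that the result
-- is the nearest integer to the true sqrt; ties (sqrt = k+0.5 exactly) cannot occur for integers.
def pyRoundSqrt (items : Int) : Int :=
  let s : Int := Int.ofNat (Nat.sqrt items.toNat)
  if items ≤ s * s + s then s else s + 1

-- the while-loop; `cols` carries the last computed cols (Python's leftover variable)
def calcGridLoopA (items : Int) (square : Bool) (rows cols : Int) : Int × Int :=
  if h : 1 ≤ rows then
    let cols := 1 + PySem.Int.floordiv (items - 1) rows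
    if !square || rows * cols == items then (rows, cols)
    else calcGridLoopA items square (rows - 1) cols
  else (rows, cols)
termination_by rows.toNat
decreasing_by omega

def calc_grid (items : Int) (rows : Int) (square : Bool) : Int × Int :=
  if items ≤ 1 then (1, 1)
  else
    let rows := if rows < 1 then pyRoundSqrt items else rows
    calcGridLoopA items square rows 0

-- ===== PORT B =====
def calc_grid_alt (items : Int) (rows : Int) (square : Bool) : Int × Int :=
  if items ≤ 1 then (1, 1)
  else
    let rows := if rows < 1 then pyRoundSqrt items else rows
    if !square then (rows, 1 + PySem.Int.floordiv (items - 1) rows)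
    else
      let best := (PySem.List.pyRange 1 (rows + 1) 1).foldl
        (fun b d => if PySem.Int.mod items d = 0 then d else b) 1
      (best, PySem.Int.floordiv items best)

-- ===== PRECONDITION & SPEC =====
def Spec_calc_grid (items : Int) (rows : Int) (square : Bool) (out : Int × Int) : Prop := out = calc_grid_alt items rows square
instance (items : Int) (rows : Int) (square : Bool) (out : Int × Int) : Decidable (Spec_calc_grid items rows square out) := by unfold Spec_calc_grid; infer_instance

-- ===== CLAIM (what is proved, stated in full; the proofs are below) =====
def Claim_equal_calc_grid : Prop := ∀ (items : Int) (rows : Int) (square : Bool), Dom_calc_grid items rows square → Spec_calc_grid items rows square (calc_grid items rows square)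

-- ===== LEMMAS AND PROOFS =====

-- the running-best fold of B
def bestDiv (items r : Int) : Int :=
  (PySem.List.pyRange 1 (r + 1) 1).foldl (fun b d => if PySem.Int.mod items d = 0 then d else b) 1

lemma bestDiv_succ (items r : Int) (h : 1 ≤ r) :
    bestDiv items r = if PySem.Int.mod items r = 0 then r else bestDiv items (r - 1) := by
  unfold bestDiv
  rw [show r + 1 = (r) + 1 from rfl, PySem.List.pyRange_one_succ_right (by omega : (1:Int) ≤ r),
    List.foldl_append]
  simp [show r - 1 + 1 = r from by ring]

lemma bestDiv_one (items : Int) : bestDiv items 1 = 1 := by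
  unfold bestDiv
  rw [PySem.List.pyRange_one_singleton]
  simp [PySem.Int.mod]

-- if r ∣ items (1 ≤ r, 1 ≤ items) then 1 + (items-1)/r = items/r and r * that = items
lemma cols_of_dvd (items r : Int) (hr : 1 ≤ r) (hi : 1 ≤ items) (hd : r ∣ items) :
    1 + PySem.Int.floordiv (items - 1) r = PySem.Int.floordiv items r := by
  rw [PySem.Int.floordiv_eq_ediv_of_pos (by omega), PySem.Int.floordiv_eq_ediv_of_pos (by omega)]
  obtain ⟨k, hk⟩ := hd
  subst hk
  have hk1 : 1 ≤ k := by nlinarith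
  have h1 : r * k - 1 = (r - 1) + (k - 1) * r := by ring
  rw [h1, Int.add_mul_ediv_right _ _ (by omega : r ≠ 0), Int.ediv_eq_zero_of_lt (by omega) (by omega),
    Int.mul_ediv_cancel_left _ (by omega : r ≠ 0)]
  ring

lemma mul_cols_ne (items r : Int) (hnd : ¬ r ∣ items) :
    ¬ r * (1 + PySem.Int.floordiv (items - 1) r) = items := by
  intro h
  exact hnd ⟨_, h.symm⟩

lemma mod_zero_iff (items r : Int) : PySem.Int.mod items r = 0 ↔ r ∣ items :=
  PySem.Int.mod_eq_zero_iff_dvd items r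

-- main loop lemma: for items ≥ 2, the descending loop equals (bestDiv, items / bestDiv)
lemma loopA_eq (items : Int) (hi : 2 ≤ items) :
    ∀ (n : Nat) (c : Int),
      calcGridLoopA items true ((n : Int) + 1) c =
        (bestDiv items ((n : Int) + 1), PySem.Int.floordiv items (bestDiv items ((n : Int) + 1))) := by
  intro n
  induction n with
  | zero =>
    intro c
    unfold calcGridLoopA
    have h1 : PySem.Int.floordiv (items - 1) 1 = items - 1 := by
      rw [PySem.Int.floordiv_eq_ediv_of_pos (by omega)]; simp
    have h2 : PySem.Int.floordiv items 1 = items := by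
      rw [PySem.Int.floordiv_eq_ediv_of_pos (by omega)]; simp
    simp only [Int.natCast_zero, zero_add]
    rw [dif_pos (by omega : (1:Int) ≤ 1)]
    simp [h2, bestDiv_one]
  | succ m ih =>
    intro c
    set r : Int := (↑(m + 1) : Int) + 1 with hr
    have hr2 : (2 : Int) ≤ r := by simp [hr]; omega
    unfold calcGridLoopA
    rw [dif_pos (by omega : 1 ≤ r)]
    by_cases hd : r ∣ items
    · have hcols := cols_of_dvd items r (by omega) (by omega) hd
      have hmul : r * (1 + PySem.Int.floordiv (items - 1) r) = items := by
        rw [hcols, PySem.Int.floordiv_eq_ediv_of_pos (by omega)]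
        exact Int.mul_ediv_cancel' hd
      have hb : bestDiv items r = r := by
        rw [bestDiv_succ items r (by omega), if_pos ((mod_zero_iff items r).mpr hd)]
      have hmul2 : r * PySem.Int.floordiv items r = items := by rw [← hcols]; exact hmul
      simp [hcols, hmul2, hb]
    · have hmul := mul_cols_ne items r hd
      have hcond : (r * (1 + PySem.Int.floordiv (items - 1) r) == items) = false :=
        beq_eq_false_iff_ne.mpr hmul
      simp only [Bool.not_true, Bool.false_or, hcond, if_false]
      have hstep : r - 1 = (↑m : Int) + 1 := by omega
      rw [hstep, ih]
      have hb : bestDiv items r = bestDiv items (r - 1) := by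
        rw [bestDiv_succ items r (by omega),
          if_neg (fun h => hd ((mod_zero_iff items r).mp h))]
      rw [hstep] at hb
      rw [hb]
      simp

lemma loopA_nonsquare (items rows : Int) (hr : 1 ≤ rows) (c : Int) :
    calcGridLoopA items false rows c = (rows, 1 + PySem.Int.floordiv (items - 1) rows) := by
  unfold calcGridLoopA
  rw [dif_pos hr]
  simp

lemma pyRoundSqrt_pos (items : Int) (hi : 2 ≤ items) : 1 ≤ pyRoundSqrt items := by
  unfold pyRoundSqrt
  have h : 1 ≤ Nat.sqrt items.toNat := Nat.le_sqrt.mpr (by omega)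
  have h' : 1 ≤ (Int.ofNat (Nat.sqrt items.toNat)) := by simp only [Int.ofNat_eq_natCast]; exact_mod_cast h
  dsimp only
  split <;> omega

-- ===== VERDICT (by name: the statement is the Claim_ definition above) =====
theorem calc_grid_spec : Claim_equal_calc_grid := by
  intro items rows square _
  unfold Spec_calc_grid calc_grid calc_grid_alt
  by_cases hi : items ≤ 1
  · simp [hi]
  · have hi2 : 2 ≤ items := by omega
    simp only [if_neg hi]
    set rows' : Int := if rows < 1 then pyRoundSqrt items else rows with hrows
    have hr1 : 1 ≤ rows' := by
      rw [hrows]; split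
      · exact pyRoundSqrt_pos items hi2
      · omega
    cases square with
    | false => simp [loopA_nonsquare items rows' hr1]
    | true =>
      obtain ⟨n, hn⟩ : ∃ n : Nat, rows' = (n : Int) + 1 :=
        ⟨(rows' - 1).toNat, by omega⟩
      rw [hn, loopA_eq items hi2 n 0]
      simp [bestDiv]
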